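-- pv_equiv track=rewrite | github.com/TheOverforge/toXo | pages/analytics/page.py | _make_date_ticks
-- ===== SOURCE A (Python) =====
-- def _make_date_ticks(dates: list[str]) -> list[tuple[int, str]]:
--     """Create sparse tick labels so they don't overlap."""
--     n = len(dates)
--     if n <= 1:
--         step = 1
--     elif n <= 10:
--         step = 1
--     elif n <= 35:
--         step = 5
--     else:
--         step = 10
--
--     ticks = []
--     for i, d in enumerate(dates):
--         if i % step == 0 or i == n - 1:
--             short = d[5:]  # "MM-DD"
--             ticks.append((i, short))
--     return ticks
-- ===== SOURCE B (Python) =====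
-- def _make_date_ticks(dates: list[str]) -> list[tuple[int, str]]:
--     """Create sparse tick labels so they don't overlap."""
--     n = len(dates)
--     if n <= 1:
--         step = 1
--     elif n <= 10:
--         step = 1
--     elif n <= 35:
--         step = 5
--     else:
--         step = 10
--
--     ticks = [(i, dates[i][5:]) for i in range(0, n, step)]
--     if n > 0 and (n - 1) % step != 0:
--         ticks.append((n - 1, dates[n - 1][5:]))
--     return ticks
-- ===== Notes on version B (the rewrite author's own statement) =====
-- stated objective: faster
-- what changed: Replaces the enumerate-every-element-and-filter-by-modulo scan with direct stride iteration over range(0, n, step) plus a single endpoint fix-up for the last label, so only n/step indices are visited instead of all n.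
import Mathlib
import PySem

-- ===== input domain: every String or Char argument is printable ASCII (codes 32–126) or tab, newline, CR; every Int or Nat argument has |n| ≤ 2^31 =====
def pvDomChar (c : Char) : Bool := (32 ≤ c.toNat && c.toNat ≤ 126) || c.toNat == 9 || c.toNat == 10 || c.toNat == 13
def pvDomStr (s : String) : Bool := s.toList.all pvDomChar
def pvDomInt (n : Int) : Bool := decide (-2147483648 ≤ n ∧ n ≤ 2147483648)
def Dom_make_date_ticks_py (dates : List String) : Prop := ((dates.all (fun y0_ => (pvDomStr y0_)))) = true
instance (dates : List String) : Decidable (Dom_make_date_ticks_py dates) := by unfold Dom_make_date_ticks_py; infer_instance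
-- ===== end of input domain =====

-- B replaces A's enumerate-and-filter-by-modulo scan with direct stride iteration
-- over range(0, n, step) plus a single endpoint fix-up, visiting only the kept indices.


-- ===== PORT A =====
-- literal transliteration of A: enumerate the list and append (i, d[5:]) when i % step == 0 or i == n-1
def make_date_ticks_py (dates : List String) : List (Int × String) :=
  let n : Int := dates.length
  let step : Int := if n ≤ 1 then 1 else if n ≤ 10 then 1 else if n ≤ 35 then 5 else 10
  (PySem.List.enumerate dates).foldl
    (fun ticks p =>
      if PySem.Int.mod p.1 step == 0 || p.1 == n - 1 then
        ticks ++ [(p.1, PySem.Str.slice p.2 (some 5) none)]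
      else ticks) []

-- ===== PORT B =====
-- literal transliteration of B: stride over range(0, n, step), then endpoint fix-up
def make_date_ticks_py_alt (dates : List String) : List (Int × String) :=
  let n : Int := dates.length
  let step : Int := if n ≤ 1 then 1 else if n ≤ 10 then 1 else if n ≤ 35 then 5 else 10
  let ticks :=
    (PySem.List.pyRange 0 n step).map
      (fun i => (i, PySem.Str.slice (PySem.List.pyGetD dates i "") (some 5) none))
  if 0 < n ∧ PySem.Int.mod (n - 1) step ≠ 0 then
    ticks ++ [(n - 1, PySem.Str.slice (PySem.List.pyGetD dates (n - 1) "") (some 5) none)]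
  else ticks

-- ===== PRECONDITION & SPEC =====
def Spec_make_date_ticks_py (dates : List String) (out : List (Int × String)) : Prop := out = make_date_ticks_py_alt dates
instance (dates : List String) (out : List (Int × String)) : Decidable (Spec_make_date_ticks_py dates out) := by unfold Spec_make_date_ticks_py; infer_instance

-- ===== CLAIM (what is proved, stated in full; the proofs are below) =====
def Claim_equal_make_date_ticks_py : Prop := ∀ (dates : List String), Dom_make_date_ticks_py dates → Spec_make_date_ticks_py dates (make_date_ticks_py dates)

-- ===== LEMMAS AND PROOFS =====

lemma pyRange_stride_succ (s m : Nat) (hs : 0 < s) :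
    PySem.List.pyRange 0 ((m : Int) + 1) s =
      PySem.List.pyRange 0 (m : Int) s ++ (if m % s = 0 then [(m : Int)] else []) := by
  have hs' : (0:Int) < (s:Int) := by exact_mod_cast hs
  rw [PySem.List.pyRange_of_pos _ _ hs', PySem.List.pyRange_of_pos _ _ hs']
  have e1 : ((m:Int) + 1 - 0 + (s:Int) - 1) = ((m + s : Nat) : Int) := by push_cast; ring
  rw [e1, ← Int.natCast_div, if_pos (by positivity : (0:Int) < (m:Int)+1)]
  simp only [Int.toNat_natCast]
  rw [Nat.add_div_right _ hs, List.range_succ, List.map_append]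
  rcases Nat.eq_zero_or_pos m with hm | hm
  · subst hm
    simp [Nat.zero_div]
  · rw [if_pos (by exact_mod_cast hm : (0:Int) < (m:Int))]
    have e2 : ((m:Int) - 0 + (s:Int) - 1) = ((m + s - 1 : Nat) : Int) := by
      push_cast [Nat.cast_sub (by omega : 1 ≤ m + s)]; ring
    rw [e2, ← Int.natCast_div]
    simp only [Int.toNat_natCast]
    -- decompose m = s * q + r
    have hdm := Nat.div_add_mod m s
    set q := m / s with hq
    set r := m % s with hr
    have hrs : r < s := Nat.mod_lt _ hs
    by_cases hd : r = 0
    · have h1 : m + s - 1 = s * q + (s - 1) := by omega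
      have h2 : (m + s - 1) / s = q := by
        rw [h1, Nat.mul_add_div hs, Nat.div_eq_of_lt (by omega)]; omega
      rw [if_pos hd, h2]
      have hsq : s * q = m := by omega
      rw [show ((m:Int)) = (s:Int)*(q:Int) from by exact_mod_cast hsq.symm]; simp
    · have hsq1 : s * (q + 1) = s * q + s := by ring
      have h1 : m + s - 1 = s * (q + 1) + (r - 1) := by omega
      have h2 : (m + s - 1) / s = q + 1 := by
        rw [h1, Nat.mul_add_div hs, Nat.div_eq_of_lt (by omega)]
      rw [if_neg hd, h2]
      simp [List.range_succ]

lemma filter_mod_eq_stride (s m : Nat) (hs : 0 < s) :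
    (PySem.List.pyRange 0 (m : Int) 1).filter (fun j => PySem.Int.mod j (s : Int) == 0) =
      PySem.List.pyRange 0 (m : Int) (s : Int) := by
  induction m with
  | zero =>
    simp only [Nat.cast_zero]
    rw [PySem.List.pyRange_one_eq_nil le_rfl,
        PySem.List.pyRange_of_pos _ _ (by exact_mod_cast hs : (0:Int) < (s:Int))]
    simp
  | succ m ih =>
    have hcast : ((m + 1 : Nat) : Int) = (m : Int) + 1 := by push_cast; ring
    rw [hcast, PySem.List.pyRange_one_succ_right (by positivity), List.filter_append,
        pyRange_stride_succ s m hs, ih]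
    congr 1
    by_cases hd : m % s = 0
    · rw [if_pos hd]
      simp [PySem.Int.mod_natCast, hd]
    · rw [if_neg hd]
      simp only [List.filter, PySem.Int.mod_natCast]
      have h0 : ((m:Int) % (s:Int) == 0) = false := by
        rw [← Int.natCast_mod]
        simp
        intro h
        have hdvd : s ∣ m := by exact_mod_cast h
        omega
      simp [h0]

lemma core (dates : List String) (s : Nat) (hs : 0 < s) :
    (PySem.List.enumerate dates).foldl
      (fun ticks p =>
        if PySem.Int.mod p.1 (s : Int) == 0 || p.1 == (dates.length : Int) - 1 then
          ticks ++ [(p.1, PySem.Str.slice p.2 (some 5) none)]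
        else ticks) []
    = (if 0 < (dates.length : Int) ∧ PySem.Int.mod ((dates.length : Int) - 1) (s : Int) ≠ 0 then
        ((PySem.List.pyRange 0 (dates.length : Int) (s : Int)).map
          (fun i => (i, PySem.Str.slice (PySem.List.pyGetD dates i "") (some 5) none)))
          ++ [((dates.length : Int) - 1, PySem.Str.slice (PySem.List.pyGetD dates ((dates.length : Int) - 1) "") (some 5) none)]
      else
        (PySem.List.pyRange 0 (dates.length : Int) (s : Int)).map
          (fun i => (i, PySem.Str.slice (PySem.List.pyGetD dates i "") (some 5) none))) := by
  simp only [PySem.List.foldl_append_if, List.nil_append]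
  rw [PySem.List.enumerate_eq_map_pyRange dates ""]
  rw [List.filter_map, List.map_map]
  rw [PySem.List.len_eq]
  rcases Nat.eq_zero_or_pos dates.length with h0 | hpos
  · rw [h0]
    simp only [Nat.cast_zero]
    rw [PySem.List.pyRange_one_eq_nil le_rfl,
        PySem.List.pyRange_of_pos _ _ (by exact_mod_cast hs : (0:Int) < (s:Int))]
    simp
  · obtain ⟨m, hm⟩ : ∃ m, dates.length = m + 1 := ⟨dates.length - 1, by omega⟩
    rw [hm]
    have hc : ((m + 1 : Nat) : Int) = (m : Int) + 1 := by push_cast; ring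
    rw [hc]
    have hsub : (m : Int) + 1 - 1 = (m : Int) := by ring
    rw [hsub, PySem.List.pyRange_one_succ_right (by positivity), List.filter_append]
    have hcongr : List.filter
        ((fun p => PySem.Int.mod p.1 (s : Int) == 0 || p.1 == (m : Int)) ∘
          (fun j => (j, PySem.List.pyGetD dates j "")))
        (PySem.List.pyRange 0 (m : Int) 1)
        = List.filter (fun j => PySem.Int.mod j (s : Int) == 0) (PySem.List.pyRange 0 (m : Int) 1) := by
      apply List.filter_congr
      intro j hj
      have hjm : j < (m : Int) := (PySem.List.mem_pyRange_one.1 hj).2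
      simp only [Function.comp]
      have : (j == (m : Int)) = false := by
        simp only [beq_eq_false_iff_ne]
        omega
      rw [this, Bool.or_false]
    rw [hcongr, filter_mod_eq_stride s m hs]
    have hlast : List.filter
        ((fun p => PySem.Int.mod p.1 (s : Int) == 0 || p.1 == (m : Int)) ∘
          (fun j => (j, PySem.List.pyGetD dates j "")))
        [(m : Int)] = [(m : Int)] := by
      simp [Function.comp]
    rw [hlast, pyRange_stride_succ s m hs]
    by_cases hd : m % s = 0
    · rw [if_pos hd, if_neg]
      · simp
      · rintro ⟨-, hmod⟩
        exact hmod (by rw [PySem.Int.mod_natCast]; exact_mod_cast congrArg (Nat.cast : Nat → Int) hd)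
    · rw [if_neg hd, if_pos]
      · simp
      · refine ⟨by positivity, ?_⟩
        rw [PySem.Int.mod_natCast]
        intro h
        exact hd (by exact_mod_cast h)

-- ===== VERDICT (by name: the statement is the Claim_ definition above) =====
theorem make_date_ticks_py_spec : Claim_equal_make_date_ticks_py := by
  intro dates _
  unfold Spec_make_date_ticks_py make_date_ticks_py make_date_ticks_py_alt
  dsimp only
  by_cases h1 : (dates.length : Int) ≤ 1
  · simp only [if_pos h1]
    simpa using core dates 1 (by norm_num)
  · simp only [if_neg h1]
    by_cases h2 : (dates.length : Int) ≤ 10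
    · simp only [if_pos h2]
      simpa using core dates 1 (by norm_num)
    · simp only [if_neg h2]
      by_cases h3 : (dates.length : Int) ≤ 35
      · simp only [if_pos h3]
        simpa using core dates 5 (by norm_num)
      · simp only [if_neg h3]
        simpa using core dates 10 (by norm_num)
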